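-- pv_equiv track=rewrite | github.com/Algorithm-P0/meanjung | kakao_intern_2019/2019kakao_intern_5.py | solution
-- ===== SOURCE A (Python) =====
-- def solution(stones, k):
--     left, right = 1, max(stones)
--     result = 1
--     while left<=right:
--         mid = (left + right) // 2
--         blank = 0
--         flag = True
--         for stone in stones:
--             if stone<mid:
--                 blank += 1
--                 if blank == k:
--                     flag = False
--                     break
--             else:
--                 blank = 0
--         if flag:
--             result = max(result, mid)
--             left = mid + 1
--         else:
--             right = mid -1
--     return result
-- ===== SOURCE B (Python) =====
-- def solution(stones, k):
--     # Direct formula instead of binary search: the answer is the minimum over all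
--     # size-k windows of the window maximum (at least 1); if there is no complete
--     # window (k < 1 or k > len(stones)), nothing blocks, so max(stones) cross.
--     n = len(stones)
--     if 0 < k <= n:
--         best = min(max(stones[i:i + k]) for i in range(n - k + 1))
--     else:
--         best = max(stones)
--     return max(1, best)
-- ===== Notes on version B (the rewrite author's own statement) =====
-- stated objective: simpler
-- what changed: Replaced A's binary search over the crossing height (re-scanning all stones per probe) by the direct formula max(1, minimum over all size-k windows of the window maximum), with max(stones) when no complete window exists.
import Mathlib
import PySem

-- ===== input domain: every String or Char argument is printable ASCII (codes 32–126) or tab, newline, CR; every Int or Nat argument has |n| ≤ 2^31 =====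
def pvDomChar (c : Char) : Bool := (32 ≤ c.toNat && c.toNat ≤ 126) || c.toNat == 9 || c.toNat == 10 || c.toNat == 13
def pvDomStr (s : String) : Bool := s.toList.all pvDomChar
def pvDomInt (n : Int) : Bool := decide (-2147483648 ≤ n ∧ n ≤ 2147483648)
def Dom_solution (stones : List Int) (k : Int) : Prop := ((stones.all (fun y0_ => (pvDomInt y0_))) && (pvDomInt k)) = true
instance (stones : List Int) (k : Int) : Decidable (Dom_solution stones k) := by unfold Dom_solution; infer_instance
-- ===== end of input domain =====

-- B replaces A's binary search over the crossing height by the direct formula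
-- max(1, minimum over all size-k windows of the window maximum); same return value.

-- ===== PORT A =====
-- inner 'for stone in stones' loop with the blank counter and the break
def checkA (k mid : Int) : List Int → Int → Bool
  | [], _ => true
  | s :: rest, blank =>
    if s < mid then
      if blank + 1 = k then false else checkA k mid rest (blank + 1)
    else checkA k mid rest 0

-- the 'while left <= right' binary search
def loopA (stones : List Int) (k left right result : Int) : Int :=
  if h : left ≤ right then
    let mid := PySem.Int.floordiv (left + right) 2
    if checkA k mid stones 0 then
      loopA stones k (mid + 1) right (max result mid)
    else
      loopA stones k left (mid - 1) result
  else result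
termination_by (right + 1 - left).toNat
decreasing_by
  · have hb := PySem.Int.floordiv_two_mid_bounds (lo := left) (hi := right) h
    omega
  · have hb := PySem.Int.floordiv_two_mid_bounds (lo := left) (hi := right) h
    omega

-- max(stones) raises on an empty list (excluded by Pre_); .getD 0 is unreachable there
def solution (stones : List Int) (k : Int) : Int :=
  loopA stones k 1 ((PySem.List.max? stones (fun y => y)).getD 0) 1

-- ===== PORT B =====
-- max(seg) for a nonempty segment (the .getD 0 default is unreachable under Pre_)
def maxS (seg : List Int) : Int := (PySem.List.max? seg (fun y => y)).getD 0

def solution_alt (stones : List Int) (k : Int) : Int :=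
  -- n = len(stones); best = min of window maxima if 0 < k <= n, else max(stones); max(1, best)
  max 1
    (if 0 < k ∧ k ≤ (stones.length : Int) then
      (PySem.List.min? ((PySem.List.pyRange 0 ((stones.length : Int) - k + 1) 1).map
        (fun i => maxS (PySem.List.slice stones (some i) (some (i + k))))) (fun y => y)).getD 0
    else maxS stones)

-- ===== PRECONDITION & SPEC =====
-- Pre_ excludes only stones = [], where Python's max(stones) raises ValueError in both A and B
def Pre_solution (stones : List Int) (k : Int) : Prop := stones ≠ []
instance (stones : List Int) (k : Int) : Decidable (Pre_solution stones k) := by unfold Pre_solution; infer_instance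

def pvWitness_solution : List Int × Int := ([2, 4, 5, 3, 2, 1, 4, 2, 5, 1], 3)

def Spec_solution (stones : List Int) (k : Int) (out : Int) : Prop := out = solution_alt stones k
instance (stones : List Int) (k : Int) (out : Int) : Decidable (Spec_solution stones k out) := by unfold Spec_solution; infer_instance

-- ===== CLAIM (what is proved, stated in full; the proofs are below) =====
def Claim_equal_solution : Prop := ∀ (stones : List Int) (k : Int), Dom_solution stones k → Pre_solution stones k → Spec_solution stones k (solution stones k)

-- ===== LEMMAS AND PROOFS =====

-- k ≤ 0: blank + 1 is always positive, so 'blank == k' never fires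
lemma checkA_true_of_nonpos (m k : Int) (hk : k ≤ 0) :
    ∀ (xs : List Int) (b : Int), 0 ≤ b → checkA k m xs b = true := by
  intro xs
  induction xs with
  | nil => intro b _; rfl
  | cons s rest ih =>
    intro b hb
    simp only [checkA]
    split_ifs with h1 h2
    · omega
    · exact ih (b + 1) (by omega)
    · exact ih 0 le_rfl

-- too few stones left: blank can never reach k
lemma checkA_true_of_short (m k : Int) :
    ∀ (xs : List Int) (b : Int), 0 ≤ b → b + (xs.length : Int) < k → checkA k m xs b = true := by
  intro xs
  induction xs with
  | nil => intro b _ _; rfl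
  | cons s rest ih =>
    intro b hb hlen
    simp only [List.length_cons] at hlen
    simp only [checkA]
    split_ifs with h1 h2
    · omega
    · exact ih (b + 1) (by omega) (by push_cast at hlen ⊢; omega)
    · exact ih 0 le_rfl (by push_cast at hlen ⊢; omega)

-- characterisation of the inner loop: it returns false iff some (possibly blank-shortened
-- leading) run of k consecutive stones is entirely below mid
lemma checkA_false_iff (m k : Int) (hk : 1 ≤ k) :
    ∀ (xs : List Int) (b : Int), 0 ≤ b → b < k →
      (checkA k m xs b = false ↔
        ((k - b).toNat ≤ xs.length ∧ ∀ x ∈ xs.take (k - b).toNat, x < m) ∨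
        (∃ r : ℕ, 1 ≤ r ∧ r + k.toNat ≤ xs.length ∧ ∀ x ∈ (xs.drop r).take k.toNat, x < m)) := by
  intro xs
  induction xs with
  | nil =>
    intro b hb0 hbk
    simp only [checkA, List.length_nil]
    constructor
    · intro h; cases h
    · rintro (⟨h1, _⟩ | ⟨r, hr1, hr2, _⟩) <;> omega
  | cons s rest ih =>
    intro b hb0 hbk
    simp only [checkA, List.length_cons]
    by_cases hs : s < m
    · rw [if_pos hs]
      by_cases hbk1 : b + 1 = k
      · -- returns false; first disjunct holds with (k-b).toNat = 1
        have ht : (k - b).toNat = 1 := by omega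
        simp only [if_pos hbk1]
        constructor
        · intro _
          left
          refine ⟨by omega, ?_⟩
          rw [ht]
          intro x hx
          simp only [List.take_succ_cons, List.take_zero, List.mem_singleton] at hx
          omega
        · intro _; trivial
      · rw [if_neg hbk1]
        have hb1k : b + 1 < k := by omega
        rw [ih (b + 1) (by omega) hb1k]
        have ht : (k - b).toNat = (k - (b + 1)).toNat + 1 := by omega
        constructor
        · rintro (⟨h1, h2⟩ | ⟨r, hr1, hr2, h3⟩)
          · left
            refine ⟨by omega, ?_⟩
            rw [ht]
            intro x hx
            simp only [List.take_succ_cons, List.mem_cons] at hx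
            rcases hx with rfl | hx
            · exact hs
            · exact h2 x hx
          · right
            exact ⟨r + 1, by omega, by omega, by simpa using h3⟩
        · rintro (⟨h1, h2⟩ | ⟨r, hr1, hr2, h3⟩)
          · left
            rw [ht] at h2
            refine ⟨by omega, fun x hx => h2 x ?_⟩
            simp only [List.take_succ_cons, List.mem_cons]
            exact Or.inr hx
          · -- a window of the tail: r ≥ 1 in s::rest means window at r-1 in rest
            rcases Nat.exists_eq_add_of_le hr1 with ⟨r', rfl⟩
            rw [Nat.add_comm 1 r', List.drop_succ_cons] at h3
            rcases Nat.eq_zero_or_pos r' with rfl | hr'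
            · -- window = take k.toNat rest: implies the (shorter) prefix disjunct
              left
              refine ⟨by omega, ?_⟩
              intro x hx
              have heq : rest.take (k - (b + 1)).toNat
                  = (rest.take k.toNat).take (k - (b + 1)).toNat := by
                rw [List.take_take, min_eq_left (by omega : (k - (b + 1)).toNat ≤ k.toNat)]
              rw [heq] at hx
              exact h3 x (by simpa using List.mem_of_mem_take hx)
            · right
              exact ⟨r', by omega, by omega, h3⟩
    · rw [if_neg hs]
      rw [ih 0 le_rfl (by omega)]
      constructor
      · rintro (⟨h1, h2⟩ | ⟨r, hr1, hr2, h3⟩)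
        · right
          refine ⟨1, le_rfl, by omega, ?_⟩
          simpa using h2
        · right
          exact ⟨r + 1, by omega, by omega, by simpa using h3⟩
      · rintro (⟨h1, h2⟩ | ⟨r, hr1, hr2, h3⟩)
        · -- prefix of s::rest contains s ≥ m: contradiction
          exfalso
          have hmem : s ∈ (s :: rest).take (k - b).toNat := by
            have h1 : 1 ≤ (k - b).toNat := by omega
            rcases Nat.exists_eq_add_of_le h1 with ⟨t, ht⟩
            rw [ht]
            simp [Nat.add_comm 1 t, List.take_succ_cons]
          have := h2 s hmem
          omega
        · rcases Nat.exists_eq_add_of_le hr1 with ⟨r', rfl⟩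
          rw [Nat.add_comm 1 r', List.drop_succ_cons] at h3
          rcases Nat.eq_zero_or_pos r' with rfl | hr'
          · left
            refine ⟨by omega, ?_⟩
            simpa using h3
          · right
            exact ⟨r', by omega, by omega, h3⟩

-- top-level form: the probe succeeds iff every size-k window holds a stone ≥ mid
lemma checkA_true_iff (m k : Int) (hk : 1 ≤ k) (xs : List Int) :
    checkA k m xs 0 = true ↔
      ∀ r : ℕ, r + k.toNat ≤ xs.length → ∃ x ∈ (xs.drop r).take k.toNat, m ≤ x := by
  have h := checkA_false_iff m k hk xs 0 le_rfl (by omega)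
  constructor
  · intro ht r hr
    by_contra hc
    push Not at hc
    have hfalse : checkA k m xs 0 = false := by
      rw [h]
      rcases Nat.eq_zero_or_pos r with rfl | hr1
      · left; exact ⟨by simpa using hr, by simpa using hc⟩
      · right; exact ⟨r, hr1, hr, hc⟩
    rw [hfalse] at ht; cases ht
  · intro hall
    by_contra hc
    rw [Bool.not_eq_true, h] at hc
    rcases hc with ⟨h1, h2⟩ | ⟨r, hr1, hr2, h3⟩
    · rcases hall 0 (by simpa using h1) with ⟨x, hx, hmx⟩
      exact absurd hmx (not_le.mpr (h2 x (by simpa using hx)))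
    · rcases hall r hr2 with ⟨x, hx, hmx⟩
      exact absurd hmx (not_le.mpr (h3 x hx))

-- max(seg) on a nonempty list: a member that bounds every member
lemma maxS_spec (seg : List Int) (h : seg ≠ []) :
    maxS seg ∈ seg ∧ ∀ y ∈ seg, y ≤ maxS seg := by
  cases hm : PySem.List.max? seg (fun y => y) with
  | none => exact absurd ((PySem.List.max?_eq_none_iff _ _).mp hm) h
  | some w =>
    have he : maxS seg = w := by simp [maxS, hm]
    rw [he]
    exact ⟨PySem.List.max?_mem hm, PySem.List.max?_isMax hm⟩

lemma le_maxS_iff (m : Int) (seg : List Int) (h : seg ≠ []) :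
    m ≤ maxS seg ↔ ∃ x ∈ seg, m ≤ x := by
  obtain ⟨hmem, hmax⟩ := maxS_spec seg h
  exact ⟨fun hm => ⟨maxS seg, hmem, hm⟩, fun ⟨x, hx, hmx⟩ => hmx.trans (hmax x hx)⟩

-- binary-search loop invariant: with flag m ↔ m ≤ X on the probed range, the loop returns max 1 X
lemma loopA_spec (stones : List Int) (k X : Int) :
    ∀ (n : ℕ) (left right result : Int), (right + 1 - left).toNat = n →
      X ≤ right → result = max 1 (min X (left - 1)) →
      (∀ m, left ≤ m → m ≤ right → (checkA k m stones 0 = true ↔ m ≤ X)) →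
      loopA stones k left right result = max 1 X := by
  intro n
  induction n using Nat.strong_induction_on with
  | _ n ih =>
    intro left right result hn hXr hres hflag
    rw [loopA]
    by_cases h : left ≤ right
    · simp only [dif_pos h]
      have hb := PySem.Int.floordiv_two_mid_bounds (lo := left) (hi := right) h
      set mid := PySem.Int.floordiv (left + right) 2 with hmid
      by_cases hf : checkA k mid stones 0 = true
      · simp only [hf, if_pos]
        have hmX : mid ≤ X := (hflag mid hb.1 hb.2).mp hf
        refine ih (right + 1 - (mid + 1)).toNat (by omega) (mid + 1) right _ rfl hXr ?_ ?_
        · rw [hres]; omega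
        · intro m hm1 hm2; exact hflag m (by omega) hm2
      · rw [if_neg hf]
        have hXm : X < mid := by
          by_contra hc
          exact hf ((hflag mid hb.1 hb.2).mpr (by omega))
        refine ih (mid - 1 + 1 - left).toNat (by omega) left (mid - 1) _ rfl (by omega) hres ?_
        intro m hm1 hm2; exact hflag m hm1 (by omega)
    · simp only [dif_neg h]
      rw [hres]; omega

-- the list of window maxima B takes the minimum of, as a set: one per start index r
lemma mem_wins_iff (stones : List Int) (k : Int) (hk : 0 < k) (w : Int) :
    w ∈ (PySem.List.pyRange 0 ((stones.length : Int) - k + 1) 1).map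
        (fun i => maxS (PySem.List.slice stones (some i) (some (i + k)))) ↔
      ∃ r : ℕ, r + k.toNat ≤ stones.length ∧ w = maxS ((stones.drop r).take k.toNat) := by
  have hkT : ((k.toNat : ℤ)) = k := Int.toNat_of_nonneg (by omega)
  rw [List.mem_map]
  constructor
  · rintro ⟨i, hi, rfl⟩
    rw [PySem.List.mem_pyRange_one] at hi
    obtain ⟨hi0, hi1⟩ := hi
    refine ⟨i.toNat, by omega, ?_⟩
    rw [PySem.List.slice_toNat stones hi0 (by omega)]
    have he : (i + k).toNat - i.toNat = k.toNat := by omega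
    rw [he]
  · rintro ⟨r, hr, rfl⟩
    refine ⟨(r : ℤ), ?_, ?_⟩
    · rw [PySem.List.mem_pyRange_one]
      constructor
      · positivity
      · omega
    · rw [PySem.List.slice_toNat stones (by positivity) (by omega)]
      have h1 : (((r : ℤ)) + k).toNat - ((r : ℤ)).toNat = k.toNat := by omega
      have h2 : ((r : ℤ)).toNat = r := by omega
      rw [h1, h2]

lemma window_ne_nil (stones : List Int) (kT r : ℕ) (hk : 1 ≤ kT)
    (hr : r + kT ≤ stones.length) : (stones.drop r).take kT ≠ [] := by
  apply List.ne_nil_of_length_pos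
  rw [List.length_take, List.length_drop]
  omega

-- ===== VERDICT (by name: the statement is the Claim_ definition above) =====
theorem solution_spec : Claim_equal_solution := by
  intro stones k _hdom hpre
  unfold Spec_solution solution solution_alt
  have hM := maxS_spec stones hpre
  set M := maxS stones with hMdef
  have hMe : (PySem.List.max? stones (fun y => y)).getD 0 = M := rfl
  rw [hMe]
  by_cases hwin : 0 < k ∧ k ≤ (stones.length : Int)
  · -- complete windows exist: X = min of window maxima
    obtain ⟨hk0, hkn⟩ := hwin
    set wins := (PySem.List.pyRange 0 ((stones.length : Int) - k + 1) 1).map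
        (fun i => maxS (PySem.List.slice stones (some i) (some (i + k)))) with hwinsdef
    have hwne : wins ≠ [] := by
      apply List.ne_nil_of_length_pos
      rw [hwinsdef, List.length_map, PySem.List.length_pyRange_one]
      omega
    obtain ⟨X, hX⟩ : ∃ X, PySem.List.min? wins (fun y => y) = some X := by
      cases hm : PySem.List.min? wins (fun y => y) with
      | none => exact absurd ((PySem.List.min?_eq_none_iff _ _).mp hm) hwne
      | some w => exact ⟨w, rfl⟩
    have hXmem : X ∈ wins := PySem.List.min?_mem hX
    have hXmin : ∀ y ∈ wins, X ≤ y := PySem.List.min?_isMin hX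
    have hkT : 1 ≤ k.toNat := by omega
    -- X bounds: X ≤ M since X is the max of some window, whose members are stones
    have hXM : X ≤ M := by
      obtain ⟨r, hr, hXe⟩ := (mem_wins_iff stones k hk0 X).mp hXmem
      have hne := window_ne_nil stones k.toNat r hkT hr
      obtain ⟨hmem, _⟩ := maxS_spec _ hne
      rw [← hXe] at hmem
      exact hM.2 X (List.mem_of_mem_drop (List.mem_of_mem_take hmem))
    -- the probe is monotone with threshold X
    have hflag : ∀ m : Int, (checkA k m stones 0 = true ↔ m ≤ X) := by
      intro m
      rw [checkA_true_iff m k (by omega)]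
      constructor
      · intro hall
        obtain ⟨r, hr, hXe⟩ := (mem_wins_iff stones k hk0 X).mp hXmem
        obtain ⟨x, hx, hmx⟩ := hall r hr
        rw [hXe, le_maxS_iff m _ (window_ne_nil stones k.toNat r hkT hr)]
        exact ⟨x, hx, hmx⟩
      · intro hmX r hr
        have hw : maxS ((stones.drop r).take k.toNat) ∈ wins :=
          (mem_wins_iff stones k hk0 _).mpr ⟨r, hr, rfl⟩
        have := hXmin _ hw
        exact (le_maxS_iff m _ (window_ne_nil stones k.toNat r hkT hr)).mp (by omega)
    rw [loopA_spec stones k X _ 1 M 1 rfl hXM (by omega)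
        (fun m _ _ => hflag m)]
    simp only [if_pos (And.intro hk0 hkn), hX, Option.getD_some]
  · -- no complete window: the probe always succeeds, answer max 1 M
    have hflag : ∀ m : Int, 1 ≤ m → m ≤ M → (checkA k m stones 0 = true ↔ m ≤ M) := by
      intro m _ hmM
      rcases not_and_or.mp hwin with hk0 | hkn
      · simp [checkA_true_of_nonpos m k (by omega) stones 0 le_rfl, hmM]
      · simp [checkA_true_of_short m k stones 0 le_rfl (by omega), hmM]
    rw [loopA_spec stones k M _ 1 M 1 rfl le_rfl (by omega) hflag]
    rw [if_neg hwin]
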